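-- pv_equiv track=rewrite | github.com/edifff/python | Tinkoff/Kontest2/H1.py | max_sum_times_min
-- ===== SOURCE A (Python) =====
-- from collections import deque
--
-- def max_sum_times_min(n, ls):
--     stack = deque()
--     left = [-1] * n
--     right = [n] * n
--
--     prefix_sums = [0] * n
--     prefix_sums[0] = ls[0]
--     for i in range(1, n):
--         prefix_sums[i] = prefix_sums[i - 1] + ls[i]
--
--     for i in range(n):
--         while stack and ls[stack[-1]] >= ls[i]:
--             stack.pop()
--         if stack:
--             left[i] = stack[-1]
--         stack.append(i)
--
--     stack.clear()
--
--     for i in range(n - 1, -1, -1):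
--         while stack and ls[stack[-1]] >= ls[i]:
--             stack.pop()
--         if stack:
--             right[i] = stack[-1]
--         stack.append(i)
--
--     max_product = float('-inf')
--
--     for i in range(n):
--         if left[i] == -1:
--             sum_sublsay = prefix_sums[right[i] - 1]
--         else:
--             sum_sublsay = prefix_sums[right[i] - 1] - prefix_sums[left[i]]
--         max_product = max(max_product, ls[i] * sum_sublsay)
--
--     return max_product
-- ===== SOURCE B (Python) =====
-- def max_sum_times_min(n, ls):
--     best = None
--     for i in range(n):
--         l = i
--         while l > 0 and ls[l - 1] >= ls[i]:
--             l -= 1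
--         r = i
--         while r < n - 1 and ls[r + 1] >= ls[i]:
--             r += 1
--         s = 0
--         for j in range(l, r + 1):
--             s += ls[j]
--         p = ls[i] * s
--         if best is None or p > best:
--             best = p
--     return best
-- ===== Notes on version B (the rewrite author's own statement) =====
-- stated objective: simpler
-- what changed: Replaced the monotonic-stack passes and prefix-sum table by a direct per-index expansion: for each i expand left/right while neighbours are >= ls[i] and sum the window locally; no auxiliary arrays.
import Mathlib
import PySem

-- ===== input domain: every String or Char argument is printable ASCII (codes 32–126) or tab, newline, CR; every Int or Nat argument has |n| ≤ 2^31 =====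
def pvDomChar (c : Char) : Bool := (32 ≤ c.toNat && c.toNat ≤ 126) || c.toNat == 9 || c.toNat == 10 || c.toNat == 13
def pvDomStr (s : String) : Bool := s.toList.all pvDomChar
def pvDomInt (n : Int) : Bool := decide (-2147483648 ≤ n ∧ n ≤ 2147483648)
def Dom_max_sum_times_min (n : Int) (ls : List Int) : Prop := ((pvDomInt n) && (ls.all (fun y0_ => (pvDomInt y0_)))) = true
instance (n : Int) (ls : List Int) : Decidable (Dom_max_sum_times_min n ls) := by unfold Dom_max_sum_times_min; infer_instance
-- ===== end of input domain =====

-- B replaces A's monotonic stacks and prefix-sum table by a direct per-index window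
-- expansion with a local sum; equivalence of the return values is proved on 1 ≤ n ≤ len(ls).

-- ===== PORT A =====

-- ls[j] for a nonnegative in-range index (exact under Pre_, where all of A's indices are in range)
def pvGetI (ls : List Int) (j : Nat) : Int := ls.getD j 0

-- the inner `while stack and ls[stack[-1]] >= ls[i]: stack.pop()` (stack head = top)
def pvPopW (g : Nat → Int) (vi : Int) : List Nat → List Nat
  | [] => []
  | t :: rest => if g t ≥ vi then pvPopW g vi rest else t :: rest

-- prefix_sums: ps[0] = ls[0]; for i in range(1, n): ps[i] = ps[i-1] + ls[i]
def pvPS (g : Nat → Int) (m : Nat) : List Int :=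
  (List.range (m - 1)).foldl (fun acc k => acc ++ [acc.getLastD 0 + g (k + 1)]) [g 0]

-- one step of the left pass: state = (stack, left-so-far)
def pvLeftStep (g : Nat → Int) (st : List Nat × List Int) (i : Nat) : List Nat × List Int :=
  let stack := pvPopW g (g i) st.1
  let l : Int := match stack with | [] => -1 | t :: _ => (t : Int)
  (i :: stack, st.2 ++ [l])

def pvLeft (g : Nat → Int) (m : Nat) : List Int :=
  ((List.range m).foldl (pvLeftStep g) ([], [])).2

-- one step of the right pass (iterated over indices n-1 … 0); outputs collected in that order
def pvRightStep (g : Nat → Int) (m : Nat) (st : List Nat × List Int) (i : Nat) : List Nat × List Int :=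
  let stack := pvPopW g (g i) st.1
  let r : Int := match stack with | [] => (m : Int) | t :: _ => (t : Int)
  (i :: stack, st.2 ++ [r])

def pvRight (g : Nat → Int) (m : Nat) : List Int :=
  ((((List.range m).reverse)).foldl (pvRightStep g m) ([], [])).2.reverse

def max_sum_times_min (n : Int) (ls : List Int) : Int :=
  let m := n.toNat
  let g := fun j => pvGetI ls j
  let ps := pvPS g m
  let left := pvLeft g m
  let right := pvRight g m
  let best := (List.range m).foldl (fun (b : Option Int) i =>
      let li := left.getD i 0
      let ri := right.getD i 0
      let s : Int := if li = -1 then ps.getD (ri - 1).toNat 0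
                     else ps.getD (ri - 1).toNat 0 - ps.getD li.toNat 0
      let p := g i * s
      some (match b with | none => p | some b0 => max b0 p)) none
  best.getD 0

-- ===== PORT B =====

-- `l = i; while l > 0 and ls[l-1] >= ls[i]: l -= 1`
def pvExpL (g : Nat → Int) (vi : Int) : Nat → Nat
  | 0 => 0
  | l + 1 => if g l ≥ vi then pvExpL g vi l else l + 1

-- `r = i; while r < n-1 and ls[r+1] >= ls[i]: r += 1`
def pvExpR (g : Nat → Int) (vi : Int) (m r : Nat) : Nat :=
  if r + 1 < m then (if g (r + 1) ≥ vi then pvExpR g vi m (r + 1) else r) else r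
termination_by m - r

def max_sum_times_min_alt (n : Int) (ls : List Int) : Int :=
  let m := n.toNat
  let g := fun j => pvGetI ls j
  let best := (List.range m).foldl (fun (b : Option Int) i =>
      let l := pvExpL g (g i) i
      let r := pvExpR g (g i) m i
      let s := (List.range' l (r + 1 - l)).foldl (fun acc j => acc + g j) 0
      let p := g i * s
      match b with
      | none => some p
      | some b0 => if p > b0 then some p else some b0) none
  best.getD 0

-- ===== PRECONDITION & SPEC =====
-- Pre_: exactly the inputs where A returns (n ≤ 0 or n > len(ls) raises IndexError).
def Pre_max_sum_times_min (n : Int) (ls : List Int) : Prop := 1 ≤ n ∧ n ≤ ls.length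
instance (n : Int) (ls : List Int) : Decidable (Pre_max_sum_times_min n ls) := by
  unfold Pre_max_sum_times_min; infer_instance

def pvWitness_max_sum_times_min : Int × List Int := (3, [1, -2, 3])

def Spec_max_sum_times_min (n : Int) (ls : List Int) (out : Int) : Prop := out = max_sum_times_min_alt n ls
instance (n : Int) (ls : List Int) (out : Int) : Decidable (Spec_max_sum_times_min n ls out) := by
  unfold Spec_max_sum_times_min; infer_instance

-- ===== CLAIM (what is proved, stated in full; the proofs are below) =====
def Claim_equal_max_sum_times_min : Prop := ∀ (n : Int) (ls : List Int), Dom_max_sum_times_min n ls → Pre_max_sum_times_min n ls → Spec_max_sum_times_min n ls (max_sum_times_min n ls)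

-- ===== LEMMAS AND PROOFS =====

def scanL (g : Nat → Int) (vi : Int) : Nat → Option Nat
  | 0 => none
  | k + 1 => if g k < vi then some k else scanL g vi k

def scanR (g : Nat → Int) (vi : Int) (m k : Nat) : Option Nat :=
  if k < m then (if g k < vi then some k else scanR g vi m (k + 1)) else none
termination_by m - k

theorem pvExpR_eq_scanR (g : Nat → Int) (vi : Int) (m r : Nat) (hr : r < m) :
    pvExpR g vi m r = (match scanR g vi m (r + 1) with | none => m - 1 | some j => j - 1) := by
  rw [pvExpR, scanR]
  by_cases h1 : r + 1 < m
  · by_cases h2 : g (r + 1) ≥ vi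
    · rw [pvExpR_eq_scanR g vi m (r + 1) h1]
      simp [h1, h2, not_lt.mpr h2]
    · simp [h1, h2, lt_of_not_ge h2]
  · rw [if_neg h1, if_neg h1]
    show r = m - 1
    omega
termination_by m - r

theorem scanR_bounds (g : Nat → Int) (vi : Int) (m k j : Nat) (h : scanR g vi m k = some j) :
    k ≤ j ∧ j < m := by
  rw [scanR] at h
  by_cases h1 : k < m
  · by_cases h2 : g k < vi
    · simp [h1, h2] at h; omega
    · simp [h1, h2] at h
      have := scanR_bounds g vi m (k + 1) j h
      omega
  · simp [h1] at h
termination_by m - k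

theorem scanL_lt (g : Nat → Int) (vi : Int) (c j : Nat) (h : scanL g vi c = some j) : j < c := by
  induction c with
  | zero => simp [scanL] at h
  | succ k ih =>
    by_cases hk : g k < vi
    · simp [scanL, hk] at h; omega
    · simp [scanL, hk] at h; exact Nat.lt_succ_of_lt (ih h)

theorem pvPopW_eq_filter (g : Nat → Int) (vi : Int) (L : List Nat)
    (h : L.Pairwise (fun a b => g b < g a)) :
    pvPopW g vi L = L.filter (fun t => decide (g t < vi)) := by
  induction L with
  | nil => rfl
  | cons t rest ih =>
    rcases List.pairwise_cons.mp h with ⟨ht, hrest⟩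
    by_cases hc : g t ≥ vi
    · simp [pvPopW, hc, not_lt.mpr hc, ih hrest]
    · have hlt : g t < vi := lt_of_not_ge hc
      have he : rest.filter (fun t => decide (g t < vi)) = rest := by
        apply List.filter_eq_self.mpr
        intro a ha
        exact decide_eq_true (lt_trans (ht a ha) hlt)
      simp [pvPopW, hc, hlt, he]

def goodUB (g : Nat → Int) (m' j : Nat) : Bool :=
  (List.range' (j + 1) (m' - 1 - j)).all (fun k => decide (g j < g k))

def goodR (g : Nat → Int) (i j : Nat) : Bool :=
  (List.range' i (j - i)).all (fun k => decide (g j < g k))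

-- goodUB unfoldings
theorem goodUB_self (g : Nat → Int) (m' : Nat) : goodUB g (m' + 1) m' = true := by
  simp [goodUB]

theorem goodUB_succ (g : Nat → Int) (m' j : Nat) (hj : j < m') :
    goodUB g (m' + 1) j = (goodUB g m' j && decide (g j < g m')) := by
  unfold goodUB
  have h1 : m' + 1 - 1 - j = (m' - 1 - j) + 1 := by omega
  have h2 : j + 1 + (m' - 1 - j) = m' := by omega
  rw [h1, List.range'_1_concat, h2, List.all_append]
  simp

theorem goodR_self (g : Nat → Int) (i : Nat) : goodR g i i = true := by
  simp [goodR]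

theorem goodR_succ (g : Nat → Int) (i j : Nat) (hj : i < j) :
    goodR g i j = (decide (g j < g i) && goodR g (i + 1) j) := by
  unfold goodR
  have h1 : j - i = (j - (i + 1)) + 1 := by omega
  rw [h1, List.range'_succ]
  simp

-- pairwise of the left stack (before the reverse)
theorem filterL_pairwise (g : Nat → Int) (m' : Nat) (L : List Nat)
    (hp : L.Pairwise (· < ·)) (hb : ∀ x ∈ L, x < m') :
    (L.filter (goodUB g m')).Pairwise (fun a b => g a < g b) := by
  induction L with
  | nil => simp
  | cons t rest ih =>
    rcases List.pairwise_cons.mp hp with ⟨ht, hrest⟩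
    by_cases hg : goodUB g m' t
    · rw [List.filter_cons_of_pos hg]
      refine List.pairwise_cons.mpr ⟨?_, ih hrest (fun x hx => hb x (List.mem_cons_of_mem _ hx))⟩
      intro b hbmem
      have hbr : b ∈ rest := List.mem_of_mem_filter hbmem
      have htb : t < b := ht b hbr
      have hbm : b < m' := hb b (List.mem_cons_of_mem _ hbr)
      have : b ∈ List.range' (t + 1) (m' - 1 - t) := by
        rw [List.mem_range'_1]; omega
      have := (List.all_eq_true.mp hg) b this
      simpa using this
    · rw [List.filter_cons_of_neg hg]
      exact ih hrest (fun x hx => hb x (List.mem_cons_of_mem _ hx))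

-- pairwise of the right stack
theorem filterR_pairwise (g : Nat → Int) (i : Nat) (L : List Nat)
    (hp : L.Pairwise (· < ·)) (hb : ∀ x ∈ L, i ≤ x) :
    (L.filter (goodR g i)).Pairwise (fun a b => g b < g a) := by
  induction L with
  | nil => simp
  | cons t rest ih =>
    rcases List.pairwise_cons.mp hp with ⟨ht, hrest⟩
    by_cases hg : goodR g i t
    · rw [List.filter_cons_of_pos hg]
      refine List.pairwise_cons.mpr ⟨?_, ih hrest (fun x hx => hb x (List.mem_cons_of_mem _ hx))⟩
      intro b hbmem
      have hbr : b ∈ rest := List.mem_of_mem_filter hbmem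
      have htb : t < b := ht b hbr
      have hgb : goodR g i b := List.of_mem_filter hbmem
      have hti : i ≤ t := hb t (List.mem_cons_self)
      have : t ∈ List.range' i (b - i) := by
        rw [List.mem_range'_1]; omega
      have := (List.all_eq_true.mp hgb) t this
      simpa using this
    · rw [List.filter_cons_of_neg hg]
      exact ih hrest (fun x hx => hb x (List.mem_cons_of_mem _ hx))

-- head lemma, left side
theorem headL (g : Nat → Int) (vi : Int) (m' : Nat) :
    ((List.range m').filter (fun j => goodUB g m' j && decide (g j < vi))).getLast? =
      scanL g vi m' := by
  induction m' with
  | zero => simp [scanL]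
  | succ k ih =>
    rw [List.range_succ, List.filter_append]
    by_cases hk : g k < vi
    · have : (List.filter (fun j => goodUB g (k+1) j && decide (g j < vi)) [k]) = [k] := by
        simp [goodUB_self, hk]
      rw [this, List.getLast?_append]  -- may need concat form
      simp [scanL, hk]
    · have h0 : (List.filter (fun j => goodUB g (k+1) j && decide (g j < vi)) [k]) = [] := by
        simp [hk]
      rw [h0, List.append_nil]
      have hcong : (List.range k).filter (fun j => goodUB g (k+1) j && decide (g j < vi)) =
          (List.range k).filter (fun j => goodUB g k j && decide (g j < vi)) := by
        apply List.filter_congr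
        intro x hx
        have hxk : x < k := List.mem_range.mp hx
        rw [goodUB_succ g k x hxk]
        by_cases hxv : g x < vi
        · have : g x < g k := lt_of_lt_of_le hxv (not_lt.mp hk)
          simp [hxv, this]
        · simp [hxv]
      rw [hcong, ih]
      simp [scanL, hk]

-- head lemma, right side
theorem headR (g : Nat → Int) (vi : Int) (m c : Nat) :
    ((List.range' c (m - c)).filter (fun j => goodR g c j && decide (g j < vi))).head? =
      scanR g vi m c := by
  rw [scanR]
  by_cases h1 : c < m
  · have h2 : m - c = (m - (c+1)) + 1 := by omega
    rw [h2, List.range'_succ]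
    by_cases hc : g c < vi
    · simp [goodR_self, hc, h1]
    · have h0 : (goodR g c c && decide (g c < vi)) = false := by simp [hc]
      have hstep : ((c :: List.range' (c+1) (m - (c+1))).filter
          (fun j => goodR g c j && decide (g j < vi))) =
          (List.range' (c+1) (m - (c+1))).filter (fun j => goodR g (c+1) j && decide (g j < vi)) := by
        rw [List.filter_cons, h0]
        simp only [Bool.false_eq_true, if_false]
        apply List.filter_congr
        intro x hx
        have hxc : c + 1 ≤ x := (List.mem_range'_1.mp hx).1
        rw [goodR_succ g c x (by omega)]
        by_cases hxv : g x < vi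
        · have : g x < g c := lt_of_lt_of_le hxv (not_lt.mp hc)
          simp [hxv, this]
        · simp [hxv]
      rw [hstep, headR g vi m (c + 1)]
      simp [h1, hc]
  · simp [Nat.sub_eq_zero_of_le (not_lt.mp h1), h1]
termination_by m - c

def leftVal (g : Nat → Int) (t : Nat) : Int :=
  match scanL g (g t) t with | none => -1 | some j => (j : Int)

def rightVal (g : Nat → Int) (m t : Nat) : Int :=
  match scanR g (g t) m (t + 1) with | none => (m : Int) | some j => (j : Int)

theorem matchHead (L : List Nat) (d : Int) :
    (match L with | [] => d | t :: _ => (t : Int)) =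
      (match L.head? with | none => d | some t => (t : Int)) := by
  cases L <;> rfl

theorem left_fold_inv (g : Nat → Int) (m' : Nat) :
    (List.range m').foldl (pvLeftStep g) ([], []) =
      (((List.range m').filter (goodUB g m')).reverse, (List.range m').map (leftVal g)) := by
  induction m' with
  | zero => simp
  | succ k ih =>
    rw [List.range_succ, List.foldl_append, ih]
    have hpair : ((((List.range k).filter (goodUB g k)).reverse).Pairwise (fun a b => g b < g a)) := by
      rw [List.pairwise_reverse]
      exact filterL_pairwise g k (List.range k) List.pairwise_lt_range
        (fun x hx => List.mem_range.mp hx)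
    have hpop : pvPopW g (g k) (((List.range k).filter (goodUB g k)).reverse) =
        ((List.range k).filter (fun j => goodUB g k j && decide (g j < g k))).reverse := by
      rw [pvPopW_eq_filter g (g k) _ hpair, List.filter_reverse, List.filter_filter]
      congr 1
      apply List.filter_congr
      intro x hx
      rw [Bool.and_comm]
    have hswap : (List.range k).filter (fun j => goodUB g k j && decide (g j < g k)) =
        (List.range k).filter (goodUB g (k+1)) := by
      apply List.filter_congr
      intro x hx
      rw [goodUB_succ g k x (List.mem_range.mp hx)]
    simp only [List.foldl_cons, List.foldl_nil, pvLeftStep, hpop]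
    simp only [Prod.mk.injEq]
    constructor
    · rw [hswap, List.filter_append]
      simp [goodUB_self]
    · rw [List.map_append]
      congr 1
      rw [matchHead, List.head?_reverse, headL]
      simp [leftVal]

theorem right_fold_inv (g : Nat → Int) (m d : Nat) (hd : d ≤ m) :
    ((List.range' (m - d) d).reverse).foldl (pvRightStep g m) ([], []) =
      ((List.range' (m - d) d).filter (goodR g (m - d)),
       ((List.range' (m - d) d).map (rightVal g m)).reverse) := by
  induction d with
  | zero => simp
  | succ k ih =>
    have hmk : m - k = (m - (k + 1)) + 1 := by omega
    have hih := ih (by omega)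
    rw [hmk] at hih
    rw [List.range'_succ, List.reverse_cons, List.foldl_append, hih]
    set i := m - (k + 1) with hi
    have hk2 : k = m - (i + 1) := by omega
    have hpair : (((List.range' (i + 1) k).filter (goodR g (i + 1))).Pairwise
        (fun a b => g b < g a)) :=
      filterR_pairwise g _ _ List.pairwise_lt_range' (fun x hx => (List.mem_range'_1.mp hx).1)
    have hpop : pvPopW g (g i) ((List.range' (i + 1) k).filter (goodR g (i + 1))) =
        (List.range' (i + 1) k).filter
          (fun j => goodR g (i + 1) j && decide (g j < g i)) := by
      rw [pvPopW_eq_filter g _ _ hpair, List.filter_filter]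
      apply List.filter_congr
      intro x hx
      rw [Bool.and_comm]
    have hswap : (List.range' (i + 1) k).filter
          (fun j => goodR g (i + 1) j && decide (g j < g i)) =
        (List.range' (i + 1) k).filter (goodR g i) := by
      apply List.filter_congr
      intro x hx
      have hxb : i < x := by
        have := (List.mem_range'_1.mp hx).1; omega
      rw [goodR_succ g _ x hxb, Bool.and_comm]
    simp only [List.foldl_cons, List.foldl_nil, pvRightStep, hpop]
    simp only [Prod.mk.injEq]
    constructor
    · rw [hswap]
      simp [goodR_self]
    · rw [List.map_cons, List.reverse_cons]
      congr 1
      rw [matchHead, hk2, headR g (g i) m (i + 1)]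
      simp [rightVal]

def pref (g : Nat → Int) (k : Nat) : Int := ((List.range (k + 1)).map g).sum

theorem pvPS_fold (g : Nat → Int) (t : Nat) :
    (List.range t).foldl (fun acc k => acc ++ [acc.getLastD 0 + g (k + 1)]) [g 0] =
      (List.range (t + 1)).map (pref g) := by
  induction t with
  | zero => simp [pref, List.range_succ]
  | succ k ih =>
    rw [List.range_succ, List.foldl_append, ih]
    simp only [List.foldl_cons, List.foldl_nil]
    have hlast : ((List.range (k + 1)).map (pref g)).getLastD 0 = pref g k := by
      rw [List.range_succ, List.map_append]
      simp
    rw [hlast]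
    have hpref : pref g k + g (k + 1) = pref g (k + 1) := by
      simp [pref, List.range_succ]
      ring
    rw [hpref, List.range_succ (n := k + 1), List.map_append]
    simp

theorem prefDiff (g : Nat → Int) (a b : Nat) (hab : a ≤ b) :
    pref g b - pref g a = ((List.range' (a + 1) (b - a)).map g).sum := by
  have hsplit : List.range' 0 (a + 1) ++ List.range' (a + 1) (b - a) = List.range' 0 (b + 1) := by
    have h := List.range'_append_1 (s := 0) (m := a + 1) (n := b - a)
    simp only [Nat.zero_add] at h
    rw [h]
    congr 1
    omega
  have : pref g b = pref g a + ((List.range' (a + 1) (b - a)).map g).sum := by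
    unfold pref
    rw [List.range_eq_range', List.range_eq_range', ← hsplit, List.map_append, List.sum_append]
  omega

theorem pvExpL_eq_scanL (g : Nat → Int) (vi : Int) (i : Nat) :
    pvExpL g vi i = (match scanL g vi i with | none => 0 | some j => j + 1) := by
  induction i with
  | zero => rfl
  | succ l ih =>
    by_cases h : g l >= vi
    · simp [pvExpL, scanL, h, not_lt.mpr h, ih]
    · simp [pvExpL, scanL, h, lt_of_not_ge h]

-- A's running max step = B's running max step
theorem pvOptStep (b0 p : Int) : some (max b0 p) = if p > b0 then some p else some b0 := by
  by_cases h : p > b0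
  · simp [h, max_eq_right (le_of_lt h)]
  · simp [h, max_eq_left (not_lt.mp h)]

-- the per-index window-sum equality: A's prefix-sum difference = B's local sum
theorem sval_eq (g : Nat → Int) (m i : Nat) (hm : 1 <= m) (hi : i < m) :
    (if leftVal g i = -1
       then ((List.range m).map (pref g)).getD (rightVal g m i - 1).toNat 0
       else ((List.range m).map (pref g)).getD (rightVal g m i - 1).toNat 0
            - ((List.range m).map (pref g)).getD (leftVal g i).toNat 0)
    = (List.range' (pvExpL g (g i) i) (pvExpR g (g i) m i + 1 - pvExpL g (g i) i)).foldl
        (fun a j => a + g j) 0 := by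
  rw [PySem.List.foldl_add, pvExpL_eq_scanL, pvExpR_eq_scanR g (g i) m i hi]
  unfold leftVal rightVal
  cases hL : scanL g (g i) i <;> cases hR : scanR g (g i) m (i + 1)
  · dsimp only
    have h1 : ((m : Int) - 1).toNat = m - 1 := by omega
    rw [if_pos rfl, h1, PySem.List.getD_map_range _ m (m - 1) 0 (by omega)]
    unfold pref
    rw [show (m - 1) + 1 = m from by omega]
    simp [List.range_eq_range']
  · rename_i jR
    have hjR := scanR_bounds g (g i) m (i + 1) jR hR
    dsimp only
    have h1 : ((jR : Int) - 1).toNat = jR - 1 := by omega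
    rw [if_pos rfl, h1, PySem.List.getD_map_range _ m (jR - 1) 0 (by omega)]
    unfold pref
    rw [show (jR - 1) + 1 = jR from by omega]
    simp [List.range_eq_range']
  · rename_i jL
    have hjL := scanL_lt g (g i) i jL hL
    dsimp only
    have h1 : ((m : Int) - 1).toNat = m - 1 := by omega
    have h2 : ((jL : Int)).toNat = jL := by omega
    rw [if_neg (by omega : ¬((jL : Int) = -1)), h1, h2,
      PySem.List.getD_map_range _ m (m - 1) 0 (by omega),
      PySem.List.getD_map_range _ m jL 0 (by omega),
      prefDiff g jL (m - 1) (by omega),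
      show m - 1 + 1 - (jL + 1) = m - 1 - jL from by omega]
    simp
  · rename_i jL jR
    have hjL := scanL_lt g (g i) i jL hL
    have hjR := scanR_bounds g (g i) m (i + 1) jR hR
    dsimp only
    have h1 : ((jR : Int) - 1).toNat = jR - 1 := by omega
    have h2 : ((jL : Int)).toNat = jL := by omega
    rw [if_neg (by omega : ¬((jL : Int) = -1)), h1, h2,
      PySem.List.getD_map_range _ m (jR - 1) 0 (by omega),
      PySem.List.getD_map_range _ m jL 0 (by omega),
      prefDiff g jL (jR - 1) (by omega),
      show jR - 1 + 1 - (jL + 1) = jR - 1 - jL from by omega]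
    simp

-- ===== VERDICT (by name: the statement is the Claim_ definition above) =====
theorem max_sum_times_min_spec : Claim_equal_max_sum_times_min := by
  intro n ls _ hpre
  obtain ⟨hn1, hn2⟩ := hpre
  have hm : 1 <= n.toNat := by omega
  unfold Spec_max_sum_times_min max_sum_times_min max_sum_times_min_alt
  have hLmap : pvLeft (pvGetI ls) n.toNat = (List.range n.toNat).map (leftVal (pvGetI ls)) := by
    unfold pvLeft
    rw [left_fold_inv]
  have hRmap : pvRight (pvGetI ls) n.toNat =
      (List.range n.toNat).map (rightVal (pvGetI ls) n.toNat) := by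
    unfold pvRight
    have h := right_fold_inv (pvGetI ls) n.toNat n.toNat (le_refl _)
    rw [Nat.sub_self] at h
    rw [List.range_eq_range', h]
    simp
  have hPSmap : pvPS (pvGetI ls) n.toNat = (List.range n.toNat).map (pref (pvGetI ls)) := by
    unfold pvPS
    rw [pvPS_fold]
    congr 2
    omega
  dsimp only
  rw [hLmap, hRmap, hPSmap]
  congr 1
  apply PySem.List.foldl_congr_mem
  intro acc x hx
  have hxm : x < n.toNat := List.mem_range.mp hx
  rw [PySem.List.getD_map_range (leftVal (pvGetI ls)) n.toNat x 0 hxm,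
    PySem.List.getD_map_range (rightVal (pvGetI ls) n.toNat) n.toNat x 0 hxm]
  have hs := sval_eq (pvGetI ls) n.toNat x hm hxm
  rw [hs]
  cases acc with
  | none => rfl
  | some b0 => exact pvOptStep b0 _
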